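/- GENERATED by c/gen_decode.py: decode facts of the image, one per distinct instruction byte string. -/
import UserX.DecodeImage

#decode_all Vorbis.Dec
  "0f28d6"  -- movaps xmm2,xmm6
  "0f8462010000"  -- je 113d8b
  "0f850d010000"  -- jne 113baa
  "0f88bc000000"  -- js 10e6a5
  "0f8f8e000000"  -- jg 114651
  "0fb6d1"  -- movzx edx,cl
  "39c5"  -- cmp ebp,eax
  "410fb6442401"  -- movzx eax,BYTE PTR [r12+0x1]
  "415d"  -- pop r13
  "41891e"  -- mov DWORD PTR [r14],ebx
  "418b742404"  -- mov esi,DWORD PTR [r12+0x4]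
  "41c7851400c00000000000"  -- mov DWORD PTR [r13+0xc00014],0x0
  "440f47f3"  -- cmova r14d,ebx
  "4439eb"  -- cmp ebx,r13d
  "448973e0"  -- mov DWORD PTR [rbx-0x20],r14d
  "4489fb"  -- mov ebx,r15d
  "448bad6cffffff"  -- mov r13d,DWORD PTR [rbp-0x94]
  "4539f5"  -- cmp r13d,r14d
  "458b642404"  -- mov r12d,DWORD PTR [r12+0x4]
  "48035d08"  -- add rbx,QWORD PTR [rbp+0x8]
  "48639540010000"  -- movsxd rdx,DWORD PTR [rbp+0x140]
  "4883bbc801000000"  -- cmp QWORD PTR [rbx+0x1c8],0x0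
  "4889442430"  -- mov QWORD PTR [rsp+0x30],rax
  "4889ee"  -- mov rsi,rbp
  "488b7598"  -- mov rsi,QWORD PTR [rbp-0x68]
  "488d2cc7"  -- lea rbp,[rdi+rax*8]
  "488d7b5c"  -- lea rdi,[rbx+0x5c]
  "488d98b0000000"  -- lea rbx,[rax+0xb0]
  "488dbc2c40010000"  -- lea rdi,[rsp+rbp*1+0x140]
  "48c1e205"  -- shl rdx,0x5
  "4901dd"  -- add r13,rbx
  "4981c4a8000000"  -- add r12,0xa8
  "498b5e08"  -- mov rbx,QWORD PTR [r14+0x8]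
  "498d7e10"  -- lea rdi,[r14+0x10]
  "49c1e702"  -- shl r15,0x2
  "4a8dbcf368030000"  -- lea rdi,[rbx+r14*8+0x368]
  "4c63e0"  -- movsxd r12,eax
  "4c89f6"  -- mov rsi,r14
  "4c8d2446"  -- lea r12,[rsi+rax*2]
  "4d0fbff6"  -- movsx r14,r14w
  "4d8d7c246c"  -- lea r15,[r12+0x6c]
  "660f2fca"  -- comisd xmm1,xmm2
  "66410f7edd"  -- movd r13d,xmm3
  "6b750403"  -- imul esi,DWORD PTR [rbp+0x4],0x3
  "743c"  -- je 10c363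
  "752f"  -- jne 104381
  "794a"  -- jns 10138d
  "7e4a"  -- jle 1118de
  "80bc24a000000066"  -- cmp BYTE PTR [rsp+0xa0],0x66
  "83c019"  -- add eax,0x19
  "8944240c"  -- mov DWORD PTR [rsp+0xc],eax
  "898544ffffff"  -- mov DWORD PTR [rbp-0xbc],eax
  "8b2b"  -- mov ebp,DWORD PTR [rbx]
  "8b73a0"  -- mov esi,DWORD PTR [rbx-0x60]
  "8d141b"  -- lea edx,[rbx+rbx*1]
  "bbff030000"  -- mov ebx,0x3ff
  "c3"  -- ret
  "c7831800c000f2f20000"  -- mov DWORD PTR [rbx+0xc00018],0xf2f2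
  "e80255ffff"  -- call 100640
  "e80cdafeff"  -- call 1075c0
  "e81701ffff"  -- call 103d00
  "e81f7cffff"  -- call 100c00
  "e82a0effff"  -- call 100640
  "e832c0feff"  -- call 100640
  "e83db8feff"  -- call 100640
  "e84831ffff"  -- call 100800
  "e85312ffff"  -- call 100640
  "e85efdfeff"  -- call 103d00
  "e86bc6feff"  -- call 100640
  "e876f6ffff"  -- call 102440
  "e881bbffff"  -- call 100800
  "e88d66ffff"  -- call 100640
  "e8968fffff"  -- call 100800
  "e8a0a6feff"  -- call 100640
  "e8aba4ffff"  -- call 100640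
  "e8b471ffff"  -- call 102ca0
  "e8be9efeff"  -- call 100300
  "e8c8feffff"  -- call 107500
  "e8d30fffff"  -- call 100640
  "e8ddacfeff"  -- call 100640
  "e8e768ffff"  -- call 102380
  "e8eeb9feff"  -- call 100640
  "e8f9f2feff"  -- call 100480
  "e91ee3ffff"  -- jmp 113b22
  "e964e5ffff"  -- jmp 113b22
  "e9bbddffff"  -- jmp 113b22
  "eb0c"  -- jmp 107773
  "eba0"  -- jmp 1087f6
  "f20f100424"  -- movsd xmm0,QWORD PTR [rsp]
  "f20f59059e430100"  -- mulsd xmm0,QWORD PTR [rip+0x1439e]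
  "f20f5e1dfbda0100"  -- divsd xmm3,QWORD PTR [rip+0x1dafb]
  "f30f105c240c"  -- movss xmm3,DWORD PTR [rsp+0xc]
  "f30f1103"  -- movss DWORD PTR [rbx],xmm0
  "f30f115c2408"  -- movss DWORD PTR [rsp+0x8],xmm3
  "f30f2ac7"  -- cvtsi2ss xmm0,edi
  "f30f594304"  -- mulss xmm0,DWORD PTR [rbx+0x4]
  "f30f5c7dfc"  -- subss xmm7,DWORD PTR [rbp-0x4]
  "f3410f107424e8"  -- movss xmm6,DWORD PTR [r12-0x18]
  "f7e3"  -- mul ebx
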